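-- pv_equiv track=rewrite | github.com/vivarium-collective/v2ecoli | v2ecoli/viz/network.py | _split_rst_sections
-- ===== SOURCE A (Python) =====
-- def _split_rst_sections(doc: str) -> list[tuple[str, str]]:
--     """Split a reST-style docstring into (heading, body) sections.
--
--     Recognises headings that are followed by an underline made of ``-`` or
--     ``=`` characters. Lines before the first such heading form a synthetic
--     ``''`` (empty-heading) section so the lead paragraph is preserved.
--     """
--     if not doc:
--         return []
--     # Dedent so inline headings keep their underline alignment.
--     import textwrap
--     lines = textwrap.dedent(doc).splitlines()
--     sections: list[tuple[str, list[str]]] = [('', [])]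
--     i = 0
--     while i < len(lines):
--         line = lines[i]
--         nxt = lines[i + 1] if i + 1 < len(lines) else ''
--         if (line.strip()
--                 and nxt.strip()
--                 and set(nxt.strip()) <= set('-=~^"')
--                 and len(nxt.strip()) >= max(3, len(line.strip()) - 2)):
--             sections.append((line.strip(), []))
--             i += 2
--             continue
--         sections[-1][1].append(line)
--         i += 1
--     return [(h, '\n'.join(body).strip('\n')) for h, body in sections]
-- ===== SOURCE B (Python) =====
-- def _split_rst_sections(doc: str) -> list[tuple[str, str]]:
--     """Recursive decomposition: recurse on the line list, building each
--     section's body forward; a heading+underline pair starts a new section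
--     returned by the recursive call (no mutable sections list, no index jumps)."""
--     if not doc:
--         return []
--     import textwrap
--
--     def is_heading(line: str, nxt: str) -> bool:
--         a, b = line.strip(), nxt.strip()
--         return (bool(a) and bool(b)
--                 and all(c in '-=~^"' for c in b)
--                 and len(b) >= max(3, len(a) - 2))
--
--     def go(ls: list[str]) -> tuple[list[str], list[tuple[str, list[str]]]]:
--         # returns (body of the current section, the later sections)
--         if not ls:
--             return [], []
--         if len(ls) >= 2 and is_heading(ls[0], ls[1]):
--             body, rest = go(ls[2:])
--             return [], [(ls[0].strip(), body)] + rest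
--         body, rest = go(ls[1:])
--         return [ls[0]] + body, rest
--
--     body, rest = go(textwrap.dedent(doc).splitlines())
--     return [(h, '\n'.join(b).strip('\n')) for h, b in [('', body)] + rest]
-- ===== Notes on version B (the rewrite author's own statement) =====
-- stated objective: alternative
-- what changed: Replaced A's two-line-lookahead while loop with manual index jumps over a mutable sections list by a recursion on the line list that returns (current section body, later sections) directly, building bodies forward with no accumulator or append-to-last.
import Mathlib
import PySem

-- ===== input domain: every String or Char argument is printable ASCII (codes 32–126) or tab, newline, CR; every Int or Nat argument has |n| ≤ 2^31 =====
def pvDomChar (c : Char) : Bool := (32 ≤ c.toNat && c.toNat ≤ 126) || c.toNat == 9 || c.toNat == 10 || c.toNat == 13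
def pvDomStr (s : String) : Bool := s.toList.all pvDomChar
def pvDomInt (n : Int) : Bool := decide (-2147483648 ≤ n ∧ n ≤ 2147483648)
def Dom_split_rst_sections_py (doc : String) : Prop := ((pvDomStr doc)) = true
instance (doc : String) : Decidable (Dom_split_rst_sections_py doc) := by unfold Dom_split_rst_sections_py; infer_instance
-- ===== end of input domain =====

-- B replaces A's index-jumping while loop over a mutable sections list by a recursion on
-- the line list that returns (current body, later sections) directly (objective: alternative).

-- ===== PORT A =====
-- Both Pythons call textwrap.dedent and end with the same comprehension; those two
-- library-level helpers (pvDedent, pvRender) are shared by the two ports.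

-- hand port of textwrap.dedent (CPython 3.11): lines made only of ' '/'\t' are emptied,
-- the margin is the common prefix of the leading ' '/'\t' runs of the lines that have
-- other content, and the margin is removed at each line start it matches; exact on
-- '\n'-separated text ('\r' is an ordinary character for dedent, as in CPython).
def pvIsWs (c : Char) : Bool := c == ' ' || c == '\t'

-- CPython's margin loop computes the longest common prefix of the indents
def pvCommonPrefix : List Char → List Char → List Char
  | a :: as, b :: bs => if a = b then a :: pvCommonPrefix as bs else []
  | _, _ => []

def pvDedent (cs : List Char) : List Char :=
  let ls := PySem.Chars.splitOn cs ['\n']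
  -- _whitespace_only_re.sub('', text)
  let ls1 := ls.map (fun l => if l ≠ [] ∧ l.all pvIsWs then [] else l)
  -- _leading_whitespace_re.findall(text)
  let inds := ls1.filterMap (fun l =>
    let ind := l.takeWhile pvIsWs
    if ind.length < l.length then some ind else none)
  let margin : List Char := match inds with
    | [] => ([] : List Char)
    | i :: r => r.foldl pvCommonPrefix i
  -- re.sub(r'(?m)^' + margin, '', text)
  let ls2 := if margin.isEmpty then ls1
    else ls1.map (fun l => if margin.isPrefixOf l then l.drop margin.length else l)
  PySem.Chars.join ['\n'] ls2

abbrev pvSecs := List (List Char × List (List Char))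

-- [(h, '\n'.join(body).strip('\n')) for h, body in sections]
def pvRender (secs : pvSecs) : List (String × String) :=
  secs.map (fun hb =>
    (String.ofList hb.1, String.ofList (PySem.Chars.stripChars (PySem.Chars.join ['\n'] hb.2) ['\n'])))

-- A's heading test on (line, nxt): line.strip() and nxt.strip() and
-- set(nxt.strip()) <= set('-=~^"') and len(nxt.strip()) >= max(3, len(line.strip()) - 2)
def pvCond (prev cur : List Char) : Bool :=
  !(PySem.Chars.strip prev).isEmpty && !(PySem.Chars.strip cur).isEmpty &&
  PySem.Set.issubset (PySem.Set.ofList (PySem.Chars.strip cur))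
    (PySem.Set.ofList ['-', '=', '~', '^', '"']) &&
  decide (((PySem.Chars.strip cur).length : Int) ≥ max 3 (((PySem.Chars.strip prev).length : Int) - 2))

-- sections[-1][1].append(line)  (sections is never empty)
def pvAppendLast : pvSecs → List Char → pvSecs
  | [], _ => []
  | [(h, b)], l => [(h, b ++ [l])]
  | x :: y :: r, l => x :: pvAppendLast (y :: r) l

-- A's while loop over i: nxt = lines[i+1] or ''; on a heading i += 2 (rest.tail),
-- otherwise append lines[i] to the last section and i += 1
def pvLoopA : List (List Char) → pvSecs → pvSecs
  | [], secs => secs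
  | l :: rest, secs =>
    -- nxt = lines[i + 1] if i + 1 < len(lines) else ''
    if pvCond l (rest.headD []) then pvLoopA rest.tail (secs ++ [(PySem.Chars.strip l, [])])
    else pvLoopA rest (pvAppendLast secs l)
termination_by ls _ => ls.length
decreasing_by
  all_goals simp only [List.length_tail, List.length_cons]
  all_goals omega

def split_rst_sections_py (doc : String) : List (String × String) :=
  if doc.toList = [] then []
  else pvRender (pvLoopA (PySem.Chars.splitlines (pvDedent doc.toList)) [([], [])])

-- ===== PORT B =====
-- is_heading(line, nxt): a and b non-empty, all(c in '-=~^"' for c in b),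
-- len(b) >= max(3, len(a) - 2)
def pvHead (line nxt : List Char) : Bool :=
  let a := PySem.Chars.strip line
  let b := PySem.Chars.strip nxt
  !a.isEmpty && !b.isEmpty && b.all (['-', '=', '~', '^', '"'].contains ·) &&
  decide ((b.length : Int) ≥ max 3 ((a.length : Int) - 2))

-- go(ls) = (body of the current section, the later sections)
def pvGo : List (List Char) → List (List Char) × pvSecs
  | [] => ([], [])
  | l :: rest =>
    match rest with
    | [] => ([l], [])
    | n :: r =>
      if pvHead l n then
        let p := pvGo r
        ([], (PySem.Chars.strip l, p.1) :: p.2)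
      else
        let p := pvGo (n :: r)
        (l :: p.1, p.2)

def split_rst_sections_py_alt (doc : String) : List (String × String) :=
  if doc.toList = [] then []
  else
    let p := pvGo (PySem.Chars.splitlines (pvDedent doc.toList))
    pvRender (([], p.1) :: p.2)

-- ===== PRECONDITION & SPEC =====
def Spec_split_rst_sections_py (doc : String) (out : List (String × String)) : Prop := out = split_rst_sections_py_alt doc
instance (doc : String) (out : List (String × String)) : Decidable (Spec_split_rst_sections_py doc out) := by unfold Spec_split_rst_sections_py; infer_instance

-- ===== CLAIM (what is proved, stated in full; the proofs are below) =====
def Claim_equal_split_rst_sections_py : Prop := ∀ (doc : String), Dom_split_rst_sections_py doc → Spec_split_rst_sections_py doc (split_rst_sections_py doc)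

-- ===== LEMMAS AND PROOFS =====

-- the two phrasings of the heading test agree
theorem pvCond_eq_pvHead (l n : List Char) : pvCond l n = pvHead l n := by
  unfold pvCond pvHead
  congr 2
  rw [Bool.eq_iff_iff]
  simp only [PySem.Set.issubset_iff, PySem.Set.mem_ofList, List.all_eq_true,
    List.contains_eq_mem, decide_eq_true_eq]

theorem pvCond_nil_right (l : List Char) : pvCond l [] = false := by
  simp [pvCond, PySem.Chars.strip]

-- extend the last section's body with several lines
def pvExtend : pvSecs → List (List Char) → pvSecs
  | [], _ => []
  | [(h, b)], xs => [(h, b ++ xs)]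
  | x :: y :: r, xs => x :: pvExtend (y :: r) xs

theorem pvExtend_nil (secs : pvSecs) : pvExtend secs [] = secs := by
  induction secs with
  | nil => rfl
  | cons x r ih =>
    cases r with
    | nil => obtain ⟨h, b⟩ := x; simp [pvExtend]
    | cons y s => simpa [pvExtend] using ih

theorem pvAppendLast_ne_nil (secs : pvSecs) (l : List Char) (h : secs ≠ []) :
    pvAppendLast secs l ≠ [] := by
  match secs with
  | [(a, b)] => simp [pvAppendLast]
  | x :: y :: r => simp [pvAppendLast]

theorem pvExtend_appendLast (secs : pvSecs) (l : List Char) (xs : List (List Char)) :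
    pvExtend (pvAppendLast secs l) xs = pvExtend secs (l :: xs) := by
  induction secs, l using pvAppendLast.induct with
  | case1 l => rfl
  | case2 a b l => simp [pvAppendLast, pvExtend]
  | case3 x y r l ih =>
    cases hz : pvAppendLast (y :: r) l with
    | nil => exact absurd hz (pvAppendLast_ne_nil _ _ (by simp))
    | cons z zs =>
      simp only [pvAppendLast, hz, pvExtend]
      rw [← hz, ih]

theorem pvExtend_concat (secs : pvSecs) (h : List Char) (xs : List (List Char)) :
    pvExtend (secs ++ [(h, [])]) xs = secs ++ [(h, xs)] := by
  induction secs with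
  | nil => simp [pvExtend]
  | cons x r ih =>
    cases r with
    | nil => simp [pvExtend]
    | cons y s => simpa [pvExtend] using ih

-- main invariant: A's index loop = extend the current sections by B's (body, sections)
theorem pvLoop_eq (lines : List (List Char)) (secs : pvSecs) :
    pvLoopA lines secs = pvExtend secs (pvGo lines).1 ++ (pvGo lines).2 := by
  induction lines, secs using pvLoopA.induct with
  | case1 secs => simp [pvLoopA, pvGo, pvExtend_nil]
  | case2 l rest secs hc ih =>
    match rest with
    | [] =>
      rw [List.headD_nil, pvCond_nil_right l] at hc
      exact Bool.noConfusion hc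
    | n :: r =>
      rw [List.headD_cons] at hc
      simp only [List.tail_cons] at ih
      rw [pvLoopA, List.headD_cons, if_pos hc, List.tail_cons, ih, pvGo]
      simp only [pvCond_eq_pvHead] at hc
      simp [hc, pvExtend_concat, pvExtend_nil]
  | case3 l rest secs hc ih =>
    rw [pvLoopA, if_neg hc, ih]
    match rest with
    | [] => simp [pvGo, pvExtend_appendLast]
    | n :: r =>
      rw [List.headD_cons] at hc
      rw [pvCond_eq_pvHead] at hc
      rw [pvGo]
      simp only [hc, Bool.false_eq_true, if_false, pvExtend_appendLast]

-- ===== VERDICT (by name: the statement is the Claim_ definition above) =====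
theorem split_rst_sections_py_spec : Claim_equal_split_rst_sections_py := by
  intro doc _
  unfold Spec_split_rst_sections_py split_rst_sections_py split_rst_sections_py_alt
  by_cases h : doc.toList = []
  · simp [h]
  · simp only [if_neg h]
    rw [pvLoop_eq]
    have : pvExtend [(([] : List Char), ([] : List (List Char)))]
        (pvGo (PySem.Chars.splitlines (pvDedent doc.toList))).1
        = [([], (pvGo (PySem.Chars.splitlines (pvDedent doc.toList))).1)] := by
      simp [pvExtend]
    rw [this]
    rfl
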